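-- pv_equiv track=rewrite | github.com/CrowbarInc/AI-DM-Ashen-Thrones- | game/behavioral_evaluators/player_agency.py | _mask_double_quoted_regions
-- ===== SOURCE A (Python) =====
-- def _mask_double_quoted_regions(text: str) -> str:
--     """Replace ASCII double-quoted spans with spaces (same length) for scanning.
--
--     Keeps indices aligned with *text* so matches can be sliced from the original.
--     Does not treat escaped quotes; TTRPG snippets rarely need `\"` inside speech.
--     """
--     out: list[str] = []
--     i = 0
--     n = len(text)
--     while i < n:
--         if text[i] == '"':
--             j = i + 1
--             while j < n and text[j] != '"':
--                 j += 1
--             if j < n: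
--                 out.append(" " * (j - i + 1))
--                 i = j + 1
--             else:
--                 out.append(" " * (n - i))
--                 i = n
--         else:
--             out.append(text[i])
--             i += 1
--     return "".join(out)
-- ===== SOURCE B (Python) =====
-- def _mask_double_quoted_regions(text: str) -> str:
--     """Split on '"' and rebuild: outside segments kept verbatim, each quoted
--     span (both quotes included) replaced by spaces of equal length; a trailing
--     unmatched quote masks to end-of-string."""
--     parts = text.split('"')
--     pieces = [parts[0]]
--     k = 1
--     while k + 1 < len(parts):
--         pieces.append(" " * (len(parts[k]) + 2))
--         pieces.append(parts[k + 1])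
--         k += 2
--     if k < len(parts):
--         pieces.append(" " * (len(parts[k]) + 1))
--     return "".join(pieces)
-- ===== Notes on version B (the rewrite author's own statement) =====
-- stated objective: faster
-- what changed: Replaces A's character-by-character index loop (appending one-char strings and nested quote-scan) by a single split on the quote character followed by a segment-level rebuild: outside segments kept verbatim, each quoted span (quotes included) replaced by an equal-length run of spaces, a trailing unmatched quote masked to end-of-string; same O(n) asymptotics but whole-segment C-level operations instead of per-character Python work.
import Mathlib
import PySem

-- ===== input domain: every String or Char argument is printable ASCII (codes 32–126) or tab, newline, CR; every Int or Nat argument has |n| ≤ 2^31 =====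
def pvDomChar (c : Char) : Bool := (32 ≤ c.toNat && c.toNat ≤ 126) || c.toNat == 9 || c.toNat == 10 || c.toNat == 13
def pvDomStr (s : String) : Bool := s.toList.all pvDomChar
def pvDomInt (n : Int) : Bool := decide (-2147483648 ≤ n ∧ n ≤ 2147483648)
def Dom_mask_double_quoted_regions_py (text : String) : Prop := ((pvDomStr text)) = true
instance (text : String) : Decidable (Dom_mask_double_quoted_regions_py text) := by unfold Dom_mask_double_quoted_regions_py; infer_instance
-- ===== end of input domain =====

-- B masks quoted spans by splitting on '"' and rebuilding from whole segments instead of A's per-character index loop (simpler decomposition, same O(n) cost).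


-- ===== PORT A =====
-- inner while loop of A: scan forward for the next '"'; returns the number of
-- characters skipped (j - i - 1) and the remainder after the closing quote,
-- or none when the scan falls off the end (j = n).
def pvAScan : List Char → Option (Nat × List Char)
  | [] => none
  | c :: rest =>
    if c = '"' then some (0, rest)
    else (pvAScan rest).map (fun p => (p.1 + 1, p.2))

theorem pvAScan_lt : ∀ (l r : List Char) (k : Nat), pvAScan l = some (k, r) → r.length < l.length := by
  intro l
  induction l with
  | nil => intro r k h; simp [pvAScan] at h
  | cons c rest ih =>
    intro r k h
    by_cases hc : c = '"'
    · rw [pvAScan, if_pos hc] at h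
      obtain ⟨_, h2⟩ := Prod.mk.injEq .. ▸ Option.some.inj h
      simp [← h2]
    · rw [pvAScan, if_neg hc] at h
      cases hsc : pvAScan rest with
      | none => rw [hsc] at h; simp at h
      | some p =>
        rw [hsc] at h
        simp only [Option.map_some, Option.some.injEq, Prod.mk.injEq] at h
        obtain ⟨h1, h2⟩ := h
        subst h2
        exact Nat.lt_succ_of_lt (ih p.2 p.1 (by rw [hsc]))

-- outer while loop of A over the remaining characters
def pvAGo : List Char → List Char
  | [] => []
  | c :: rest =>
    if c = '"' then
      match h : pvAScan rest with
      | some (k, rest') => List.replicate (k + 2) ' ' ++ pvAGo rest'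
      | none => List.replicate (rest.length + 1) ' '
    else c :: pvAGo rest
  termination_by l => l.length
  decreasing_by
    · exact Nat.lt_succ_of_lt (pvAScan_lt _ _ _ h)
    · simp

def mask_double_quoted_regions_py (text : String) : String :=
  String.ofList (pvAGo text.toList)

-- ===== PORT B =====
-- text.split('"')
def pvSplitQ : List Char → List (List Char)
  | [] => [[]]
  | c :: rest =>
    if c = '"' then [] :: pvSplitQ rest
    else
      match pvSplitQ rest with
      | p :: ps => (c :: p) :: ps
      | [] => [[c]]

-- B's while loop over parts[1:], consumed two at a time, plus the trailing
-- unmatched segment if the number of quotes is odd.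
def pvRebuild : List (List Char) → List Char
  | [] => []
  | [last] => List.replicate (last.length + 1) ' '
  | inside :: after :: ps => List.replicate (inside.length + 2) ' ' ++ after ++ pvRebuild ps

def mask_double_quoted_regions_py_alt (text : String) : String :=
  match pvSplitQ text.toList with
  | [] => ""
  | p0 :: ps => String.ofList (p0 ++ pvRebuild ps)

-- ===== PRECONDITION & SPEC =====
def Spec_mask_double_quoted_regions_py (text : String) (out : String) : Prop := out = mask_double_quoted_regions_py_alt text
instance (text : String) (out : String) : Decidable (Spec_mask_double_quoted_regions_py text out) := by unfold Spec_mask_double_quoted_regions_py; infer_instance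

-- ===== CLAIM (what is proved, stated in full; the proofs are below) =====
def Claim_equal_mask_double_quoted_regions_py : Prop := ∀ (text : String), Dom_mask_double_quoted_regions_py text → Spec_mask_double_quoted_regions_py text (mask_double_quoted_regions_py text)

-- ===== LEMMAS AND PROOFS =====

theorem pvSplitQ_ne_nil (l : List Char) : pvSplitQ l ≠ [] := by
  cases l with
  | nil => simp [pvSplitQ]
  | cons c rest =>
    by_cases hc : c = '"'
    · simp [pvSplitQ, hc]
    · simp only [pvSplitQ, if_neg hc]
      cases pvSplitQ rest <;> simp

-- relate A's inner scan to B's split of the same suffix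
theorem pvAScan_splitQ (l : List Char) :
    (pvAScan l = none ∧ pvSplitQ l = [l]) ∨
    (∃ p rest', pvAScan l = some (p.length, rest') ∧
      pvSplitQ l = p :: pvSplitQ rest' ∧ rest'.length < l.length) := by
  induction l with
  | nil => left; exact ⟨rfl, rfl⟩
  | cons c rest ih =>
    by_cases hc : c = '"'
    · right
      exact ⟨[], rest, by simp [pvAScan, hc], by simp [pvSplitQ, hc], by simp⟩
    · rcases ih with ⟨h1, h2⟩ | ⟨p, rest', h1, h2, h3⟩
      · left
        constructor
        · simp [pvAScan, hc, h1]
        · simp [pvSplitQ, hc, h2]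
      · right
        refine ⟨c :: p, rest', ?_, ?_, Nat.lt_succ_of_lt h3⟩
        · simp [pvAScan, hc, h1]
        · simp [pvSplitQ, hc, h2]

-- B's result on a char list
def pvBOf (l : List Char) : List Char :=
  match pvSplitQ l with
  | [] => []
  | p0 :: ps => p0 ++ pvRebuild ps

theorem pvAGo_cons_ne (c : Char) (rest : List Char) (hc : c ≠ '"') :
    pvAGo (c :: rest) = c :: pvAGo rest := by
  rw [pvAGo, if_neg hc]

theorem pvAGo_quote_none (rest : List Char) (h : pvAScan rest = none) :
    pvAGo ('"' :: rest) = List.replicate (rest.length + 1) ' ' := by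
  rw [pvAGo, if_pos rfl]
  split
  · rename_i k r heq; rw [h] at heq; exact absurd heq (by simp)
  · rfl

theorem pvAGo_quote_some (rest : List Char) (k : Nat) (r : List Char)
    (h : pvAScan rest = some (k, r)) :
    pvAGo ('"' :: rest) = List.replicate (k + 2) ' ' ++ pvAGo r := by
  rw [pvAGo, if_pos rfl]
  split
  · rename_i k' r' heq
    rw [h] at heq
    obtain ⟨hk, hr⟩ := Prod.mk.injEq .. ▸ Option.some.inj heq
    rw [hk, hr]
  · rename_i heq; rw [h] at heq; exact absurd heq (by simp)

theorem pvAGo_eq_pvBOf : ∀ (n : Nat) (l : List Char), l.length ≤ n → pvAGo l = pvBOf l := by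
  intro n
  induction n with
  | zero =>
    intro l hl
    have : l = [] := List.eq_nil_of_length_eq_zero (Nat.le_zero.mp hl)
    subst this
    simp [pvAGo, pvBOf, pvSplitQ, pvRebuild]
  | succ n ih =>
    intro l hl
    cases l with
    | nil => simp [pvAGo, pvBOf, pvSplitQ, pvRebuild]
    | cons c rest =>
      have hr : rest.length ≤ n := Nat.lt_succ_iff.mp (by simpa using hl)
      by_cases hc : c = '"'
      · subst hc
        rcases pvAScan_splitQ rest with ⟨h1, h2⟩ | ⟨p, rest', h1, h2, h3⟩
        · rw [pvAGo_quote_none rest h1]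
          simp [pvBOf, pvSplitQ, h2, pvRebuild]
        · have hr' : rest'.length ≤ n := Nat.le_trans (Nat.le_of_lt h3) hr
          have hget := pvSplitQ_ne_nil rest'
          rcases hq : pvSplitQ rest' with _ | ⟨q0, qs⟩
          · exact absurd hq hget
          · have ihrest' := ih rest' hr'
            simp only [pvBOf, hq] at ihrest'
            rw [pvAGo_quote_some rest p.length rest' h1, ihrest']
            simp [pvBOf, pvSplitQ, h2, hq, pvRebuild]
      · have ihrest := ih rest hr
        have hget := pvSplitQ_ne_nil rest
        rcases hq : pvSplitQ rest with _ | ⟨p0, ps⟩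
        · exact absurd hq hget
        · simp only [pvBOf, hq] at ihrest
          rw [pvAGo_cons_ne c rest hc, ihrest]
          simp [pvBOf, pvSplitQ, hc, hq]

-- ===== VERDICT (by name: the statement is the Claim_ definition above) =====
theorem mask_double_quoted_regions_py_spec : Claim_equal_mask_double_quoted_regions_py := by
  intro text _
  unfold Spec_mask_double_quoted_regions_py mask_double_quoted_regions_py mask_double_quoted_regions_py_alt
  have h := pvAGo_eq_pvBOf text.toList.length text.toList (Nat.le_refl _)
  rcases hq : pvSplitQ text.toList with _ | ⟨p0, ps⟩
  · exact absurd hq (pvSplitQ_ne_nil _)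
  · simp only [pvBOf, hq] at h
    rw [h]
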